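-- pv_equiv track=rewrite | github.com/DURKESH-KUMAR/AGRINOVA-e-YIC-ML-Models | Model ML 1/test.py | detect_spoilage
-- ===== SOURCE A (Python) =====
-- WARNING_PPM    = 220
--
-- CRITICAL_PPM   = 250
--
-- def detect_spoilage(forecast_arr, t_arr, consec=3) -> dict:
--     """
--     Return first day of CONSEC consecutive days >= each threshold.
--     If the forecast never sustains CONSEC consecutive days above the threshold
--     but does cross it at least once, fall back to the first crossing day.
--     Returns None only if the threshold is never reached at all.
--     """
--     out = {}
--     for label, thr in [("warning", WARNING_PPM), ("critical", CRITICAL_PPM)]: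
--         streak      = 0
--         found       = None   # first day of CONSEC-consecutive streak
--         first_cross = None   # first day gas ever crosses the threshold (fallback)
--         for i, v in enumerate(forecast_arr):
--             if v >= thr:
--                 if first_cross is None:
--                     first_cross = int(t_arr[i])   # record very first crossing
--                 streak += 1
--                 if streak >= consec and found is None:
--                     found = int(t_arr[i - consec + 1])
--                     break
--             else:
--                 streak = 0
--         # fall back to first single crossing when consecutive streak never completes
--         out[label] = found if found is not None else first_cross
--     return out
-- ===== SOURCE B (Python) =====
-- WARNING_PPM    = 220
--
-- CRITICAL_PPM   = 250
--
-- def _first_day(forecast_arr, t_arr, consec, thr):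
--     """First day of a length-`consec` window entirely >= thr; else the first
--     crossing day; else None."""
--     sustained = next((int(t_arr[j])
--                       for j in range(len(forecast_arr) - consec + 1)
--                       if all(v >= thr for v in forecast_arr[j:j + consec])),
--                      None)
--     if sustained is not None:
--         return sustained
--     return next((int(t_arr[i]) for i, v in enumerate(forecast_arr) if v >= thr),
--                 None)
--
-- def detect_spoilage(forecast_arr, t_arr, consec=3) -> dict:
--     out = {}
--     for label, thr in [("warning", WARNING_PPM), ("critical", CRITICAL_PPM)]:
--         out[label] = _first_day(forecast_arr, t_arr, consec, thr)
--     return out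
-- ===== Notes on version B (the rewrite author's own statement) =====
-- stated objective: alternative
-- what changed: A's single fused loop with an incremental streak counter, early break and interleaved first-cross tracking is replaced by two independent, differently-shaped scans: a window search (all(...) over each length-consec slice) for the first sustained day, and a separate first-crossing scan as fallback.
-- outside the precondition, e.g. on detect_spoilage([], [], 0): A returns {'warning': None, 'critical': None}, B raises IndexError
import Mathlib
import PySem

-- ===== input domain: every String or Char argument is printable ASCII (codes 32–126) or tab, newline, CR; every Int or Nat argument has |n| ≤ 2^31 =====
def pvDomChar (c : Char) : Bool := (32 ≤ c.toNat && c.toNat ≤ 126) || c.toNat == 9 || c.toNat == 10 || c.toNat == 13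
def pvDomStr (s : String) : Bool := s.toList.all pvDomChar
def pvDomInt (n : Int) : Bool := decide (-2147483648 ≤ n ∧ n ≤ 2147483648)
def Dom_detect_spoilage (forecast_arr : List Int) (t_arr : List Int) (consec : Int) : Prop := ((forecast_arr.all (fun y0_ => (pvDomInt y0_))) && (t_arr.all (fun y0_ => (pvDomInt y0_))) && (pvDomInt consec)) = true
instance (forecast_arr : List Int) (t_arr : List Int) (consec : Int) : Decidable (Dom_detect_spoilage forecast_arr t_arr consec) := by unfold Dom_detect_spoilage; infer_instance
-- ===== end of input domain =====

-- B replaces A's fused streak-counter loop by two independent scans (window search + first-crossing scan); equal output proved on Pre_.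

-- ===== PORT A =====
-- A's inner `for i, v in enumerate(forecast_arr)` loop: state = (index i, streak, first_cross);
-- returns (found, first_cross).  `t_arr[i]` is PySem.List.pyGetD (in range under Pre_detect_spoilage).
def detectLoopA (t : List Int) (consec thr : Int) : List Int → Int → Int → Option Int → Option Int × Option Int
  | [], _, _, fc => (none, fc)
  | v :: rest, i, s, fc =>
    if thr ≤ v then
      let fc' := match fc with
        | none => some (PySem.List.pyGetD t i 0)
        | some x => some x
      if consec ≤ s + 1 then (some (PySem.List.pyGetD t (i - consec + 1) 0), fc')  -- break
      else detectLoopA t consec thr rest (i + 1) (s + 1) fc'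
    else detectLoopA t consec thr rest (i + 1) 0 fc

def detect_spoilage (forecast_arr : List Int) (t_arr : List Int) (consec : Int) : List (String × Option Int) :=
  (([("warning", (220 : Int)), ("critical", (250 : Int))]).foldl
    (fun (out : PySem.Dict String (Option Int)) lt =>
      let r := detectLoopA t_arr consec lt.2 forecast_arr 0 0 none
      out.insert lt.1 (match r.1 with | some x => some x | none => r.2))
    PySem.Dict.empty).items

-- ===== PORT B =====
-- `next((int(t_arr[j]) for j in range(len(f)-consec+1) if all(v >= thr for v in f[j:j+consec])), None)`
def altWin (f t : List Int) (consec thr : Int) : List Int → Option Int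
  | [] => none
  | j :: rest =>
    if (PySem.List.slice f (some j) (some (j + consec))).all (fun v => decide (thr ≤ v)) then
      some (PySem.List.pyGetD t j 0)
    else altWin f t consec thr rest

-- `next((int(t_arr[i]) for i, v in enumerate(forecast_arr) if v >= thr), None)`
def altCross (t : List Int) (thr : Int) : List Int → Int → Option Int
  | [], _ => none
  | v :: rest, i => if thr ≤ v then some (PySem.List.pyGetD t i 0) else altCross t thr rest (i + 1)

def altFirstDay (f t : List Int) (consec thr : Int) : Option Int :=
  match altWin f t consec thr (PySem.List.pyRange 0 ((f.length : Int) - consec + 1) 1) with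
  | some x => some x
  | none => altCross t thr f 0

def detect_spoilage_alt (forecast_arr : List Int) (t_arr : List Int) (consec : Int) : List (String × Option Int) :=
  (([("warning", (220 : Int)), ("critical", (250 : Int))]).foldl
    (fun (out : PySem.Dict String (Option Int)) lt =>
      out.insert lt.1 (altFirstDay forecast_arr t_arr consec lt.2))
    PySem.Dict.empty).items

-- ===== PRECONDITION & SPEC =====
-- Pre_ restricts to the natural domain: consec ≥ 1 (a non-positive streak length is malformed; there A's
-- `streak >= consec` fires at the first crossing and indexes t_arr[i-consec+1], raising IndexError or
-- returning a shifted day) and no threshold crossing (value ≥ 220) at a position past the end of t_arr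
-- (such a crossing can make `t_arr[i]` raise IndexError in both programs).
def Pre_detect_spoilage (forecast_arr : List Int) (t_arr : List Int) (consec : Int) : Prop :=
  1 ≤ consec ∧ ∀ v ∈ forecast_arr.drop t_arr.length, v < 220
instance (forecast_arr : List Int) (t_arr : List Int) (consec : Int) : Decidable (Pre_detect_spoilage forecast_arr t_arr consec) := by unfold Pre_detect_spoilage; infer_instance

def pvWitness_detect_spoilage : List Int × List Int × Int := ([230, 260, 100], [1, 2, 3], 2)

def Spec_detect_spoilage (forecast_arr : List Int) (t_arr : List Int) (consec : Int) (out : List (String × Option Int)) : Prop := out = detect_spoilage_alt forecast_arr t_arr consec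
instance (forecast_arr : List Int) (t_arr : List Int) (consec : Int) (out : List (String × Option Int)) : Decidable (Spec_detect_spoilage forecast_arr t_arr consec out) := by unfold Spec_detect_spoilage; infer_instance

-- ===== CLAIM (what is proved, stated in full; the proofs are below) =====
def Claim_equal_detect_spoilage : Prop := ∀ (forecast_arr : List Int) (t_arr : List Int) (consec : Int), Dom_detect_spoilage forecast_arr t_arr consec → Pre_detect_spoilage forecast_arr t_arr consec → Spec_detect_spoilage forecast_arr t_arr consec (detect_spoilage forecast_arr t_arr consec)

-- ===== LEMMAS AND PROOFS =====

-- The streak completes at position k (0-based within the scanned suffix) given incoming streak s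
-- iff cn ≤ s + k + 1 and the last min(cn, k+1) scanned elements are all ≥ thr.
def goodW (f : List Int) (cn : Nat) (thr : Int) (s k : Nat) : Bool :=
  decide (cn ≤ s + k + 1) && ((f.take (k + 1)).drop (k + 1 - cn)).all (fun v => decide (thr ≤ v))

theorem goodW_zero (v : Int) (rest : List Int) (cn : Nat) (thr : Int) (s : Nat) (hcn : 1 ≤ cn) :
    goodW (v :: rest) cn thr s 0 = (decide (cn ≤ s + 1) && decide (thr ≤ v)) := by
  have h : 1 - cn = 0 := by omega
  simp [goodW, h]

theorem goodW_cons_pos (v : Int) (rest : List Int) (cn : Nat) (thr : Int) (s k : Nat)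
    (hv : thr ≤ v) : goodW (v :: rest) cn thr s (k + 1) = goodW rest cn thr (s + 1) k := by
  by_cases hc : cn ≤ k + 1
  · have h1 : k + 2 - cn = (k + 1 - cn) + 1 := by omega
    have h2 : (cn ≤ s + (k + 1) + 1) = (cn ≤ (s + 1) + k + 1) := propext (by omega)
    simp [goodW, h1, h2, List.drop_succ_cons]
  · have h1 : k + 2 - cn = 0 := by omega
    have h2 : k + 1 - cn = 0 := by omega
    have h3 : (cn ≤ s + (k + 1) + 1) = (cn ≤ (s + 1) + k + 1) := propext (by omega)
    simp [goodW, h1, h2, h3, hv]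

theorem goodW_cons_neg (v : Int) (rest : List Int) (cn : Nat) (thr : Int) (s k : Nat)
    (hv : ¬ thr ≤ v) : goodW (v :: rest) cn thr s (k + 1) = goodW rest cn thr 0 k := by
  by_cases hc : cn ≤ k + 1
  · have h1 : k + 2 - cn = (k + 1 - cn) + 1 := by omega
    have h2 : cn ≤ s + (k + 1) + 1 := by omega
    have h3 : cn ≤ k + 1 := hc
    simp [goodW, h1, h2, h3, List.drop_succ_cons]
  · have h1 : k + 2 - cn = 0 := by omega
    have h3 : ¬ cn ≤ k + 1 := hc
    simp [goodW, h1, h3, hv]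

theorem find?_range_succ (n : Nat) (p : Nat → Bool) :
    (List.range (n + 1)).find? p
      = if p 0 then some 0 else ((List.range n).find? (fun k => p (k + 1))).map (· + 1) := by
  rw [List.range_succ_eq_map]
  by_cases h0 : p 0
  · simp [h0]
  · simp [h0, List.find?_map]
    rfl

theorem find?_range_shift (d : Nat) (Q : Nat → Bool) : ∀ (n : Nat),
    (List.range n).find? (fun k => decide (d ≤ k) && Q (k - d))
      = ((List.range (n - d)).find? Q).map (· + d) := by
  induction d with
  | zero =>
    intro n
    simp only [Nat.zero_le, decide_true, Bool.true_and, Nat.sub_zero]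
    cases h : (List.range n).find? Q <;> simp
  | succ d ih =>
    intro n
    cases n with
    | zero => simp
    | succ m =>
      rw [find?_range_succ]
      have hp0 : (decide (d + 1 ≤ 0) && Q (0 - (d + 1))) = false := by simp
      rw [hp0]
      simp only [Bool.false_eq_true, if_false]
      have hpt : (fun k => decide (d + 1 ≤ k + 1) && Q (k + 1 - (d + 1)))
          = (fun k => decide (d ≤ k) && Q (k - d)) := by
        funext k
        have h1 : decide (d + 1 ≤ k + 1) = decide (d ≤ k) := by
          simp
        have h2 : k + 1 - (d + 1) = k - d := by omega
        rw [h1, h2]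
      rw [hpt, ih m]
      have hm : m - d = m + 1 - (d + 1) := by omega
      rw [hm]
      cases h : (List.range (m + 1 - (d + 1))).find? Q <;> simp [Nat.add_assoc]

-- A's loop, characterised: first component is the first completion point of the streak,
-- second is fc (if set) else the first crossing in the scanned suffix.
theorem detectLoopA_eq (t : List Int) (cn : Nat) (thr : Int) (hcn : 1 ≤ cn) :
    ∀ (f : List Int) (i s : Nat) (fc : Option Int),
    detectLoopA t (cn : Int) thr f (i : Int) (s : Int) fc
      = (((List.range f.length).find? (goodW f cn thr s)).map
           (fun k : Nat => PySem.List.pyGetD t ((i : Int) + (k : Int) - (cn : Int) + 1) 0),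
         match fc with
         | some x => some x
         | none => (f.findIdx? (fun v => decide (thr ≤ v))).map
             (fun k : Nat => PySem.List.pyGetD t ((i : Int) + (k : Int)) 0)) := by
  intro f
  induction f with
  | nil =>
    intro i s fc
    cases fc <;> simp [detectLoopA]
  | cons v rest ih =>
    intro i s fc
    rw [List.length_cons, find?_range_succ, goodW_zero v rest cn thr s hcn]
    have hsucc : ((s : Int) + 1) = ((s + 1 : Nat) : Int) := by omega
    have hisucc : ((i : Int) + 1) = ((i + 1 : Nat) : Int) := by omega
    by_cases hv : thr ≤ v
    · by_cases hbrk : (cn : Int) ≤ (s : Int) + 1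
      · have hb : (decide (cn ≤ s + 1) && decide (thr ≤ v)) = true := by
          simp [hv]; omega
        simp only [detectLoopA, if_pos hv, if_pos hbrk, hb, if_true]
        simp only [Prod.mk.injEq]
        refine ⟨?_, ?_⟩
        · have hval : (i : Int) + ((0 : Nat) : Int) - (cn : Int) + 1
              = (i : Int) - (cn : Int) + 1 := by omega
          rw [Option.map_some, hval]
        · cases fc with
          | some x => rfl
          | none => simp [List.findIdx?_cons, hv]
      · have hb : (decide (cn ≤ s + 1) && decide (thr ≤ v)) = false := by
          have h : ¬ cn ≤ s + 1 := by omega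
          simp [h]
        simp only [detectLoopA, if_pos hv, if_neg hbrk, hb, Bool.false_eq_true, if_false]
        rw [hsucc, hisucc,
          ih (i + 1) (s + 1) (match fc with
            | none => some (PySem.List.pyGetD t (i : Int) 0)
            | some x => some x)]
        have hpt : (fun k => goodW (v :: rest) cn thr s (k + 1)) = goodW rest cn thr (s + 1) := by
          funext k; exact goodW_cons_pos v rest cn thr s k hv
        rw [hpt]
        simp only [Prod.mk.injEq]
        refine ⟨?_, ?_⟩
        · cases hfind : (List.range rest.length).find? (goodW rest cn thr (s + 1)) with
          | none => simp
          | some a =>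
            simp only [Option.map_some]
            congr 1
            push_cast
            ring_nf
        · cases fc with
          | some x => rfl
          | none =>
            simp only [List.findIdx?_cons, hv, decide_true, if_true]
            simp
    · have hv' : decide (thr ≤ v) = false := by simp [hv]
      simp only [detectLoopA, if_neg hv, hv', Bool.and_false, Bool.false_eq_true, if_false]
      have h0 : (0 : Int) = ((0 : Nat) : Int) := rfl
      rw [hisucc, h0, ih (i + 1) 0 fc]
      have hpt : (fun k => goodW (v :: rest) cn thr s (k + 1)) = goodW rest cn thr 0 := by
        funext k; exact goodW_cons_neg v rest cn thr s k hv
      rw [hpt]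
      simp only [Prod.mk.injEq]
      refine ⟨?_, ?_⟩
      · cases h : (List.range rest.length).find? (goodW rest cn thr 0) with
        | none => simp
        | some a =>
          simp only [Option.map_some]
          congr 1
          push_cast
          ring_nf
      · cases fc with
        | some x => rfl
        | none =>
          simp only [List.findIdx?_cons, hv', Bool.false_eq_true, if_false]
          cases h : rest.findIdx? (fun v => decide (thr ≤ v)) with
          | none => simp
          | some a =>
            simp only [Option.map_some]
            congr 1
            push_cast
            ring_nf

-- B's window scan over the (cast) start indices is a find? over the window predicate.
theorem altWin_eq (f t : List Int) (cn : Nat) (thr : Int) : ∀ (js : List Nat),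
    altWin f t (cn : Int) thr (List.map Nat.cast js)
      = (js.find? (fun j => ((f.drop j).take cn).all (fun v => decide (thr ≤ v)))).map
          (fun j : Nat => PySem.List.pyGetD t (j : Int) 0) := by
  intro js
  induction js with
  | nil => simp [altWin]
  | cons j rest ih =>
    have hsl : PySem.List.slice f (some (j : Int)) (some ((j : Int) + (cn : Int)))
        = (f.drop j).take cn := PySem.List.slice_natCast_add f j cn
    by_cases h : ((f.drop j).take cn).all (fun v => decide (thr ≤ v))
    · simp only [List.map_cons, altWin, hsl]
      rw [if_pos h, List.find?_cons_of_pos (p := fun j => ((f.drop j).take cn).all (fun v => decide (thr ≤ v))) h]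
      rfl
    · simp only [List.map_cons, altWin, hsl, h, Bool.false_eq_true, if_false, ih]
      rw [List.find?_cons_of_neg (p := fun j => ((f.drop j).take cn).all (fun v => decide (thr ≤ v))) (by simpa using h)]

theorem altCross_eq (t : List Int) (thr : Int) : ∀ (f : List Int) (i : Nat),
    altCross t thr f (i : Int)
      = (f.findIdx? (fun v => decide (thr ≤ v))).map
          (fun k : Nat => PySem.List.pyGetD t ((i : Int) + (k : Int)) 0) := by
  intro f
  induction f with
  | nil => intro i; simp [altCross]
  | cons v rest ih =>
    intro i
    by_cases hv : thr ≤ v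
    · simp [altCross, hv, List.findIdx?_cons]
    · have hv' : decide (thr ≤ v) = false := by simp [hv]
      have hisucc : ((i : Int) + 1) = ((i + 1 : Nat) : Int) := by omega
      simp only [altCross, if_neg hv, hisucc, ih (i + 1), List.findIdx?_cons, hv',
        Bool.false_eq_true, if_false]
      cases h : rest.findIdx? (fun v => decide (thr ≤ v)) with
      | none => simp
      | some a =>
        simp only [Option.map_some]
        congr 1
        push_cast
        ring_nf

-- goodW with incoming streak 0 is the shifted window predicate.
theorem goodW_zero_streak (f : List Int) (cn : Nat) (thr : Int) (hcn : 1 ≤ cn) :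
    goodW f cn thr 0 = (fun k => decide (cn - 1 ≤ k)
      && ((f.drop (k - (cn - 1))).take cn).all (fun v => decide (thr ≤ v))) := by
  funext k
  by_cases hc : cn ≤ k + 1
  · have h1 : decide (cn ≤ 0 + k + 1) = true := by simp; omega
    have h2 : decide (cn - 1 ≤ k) = true := by simp; omega
    have h3 : (f.take (k + 1)).drop (k + 1 - cn) = (f.drop (k + 1 - cn)).take cn := by
      rw [List.drop_take]
      congr 1
      omega
    have h4 : k + 1 - cn = k - (cn - 1) := by omega
    rw [goodW, h1, h2, h3, h4]
  · have h1 : decide (cn ≤ 0 + k + 1) = false := by simp; omega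
    have h2 : decide (cn - 1 ≤ k) = false := by simp; omega
    rw [goodW, h1, h2]
    simp

-- Per-threshold agreement.
theorem perThreshold (f t : List Int) (c thr : Int) (hc : 1 ≤ c) :
    (match (detectLoopA t c thr f 0 0 none).1 with
     | some x => some x
     | none => (detectLoopA t c thr f 0 0 none).2) = altFirstDay f t c thr := by
  obtain ⟨cn, rfl⟩ : ∃ cn : Nat, c = (cn : Int) := ⟨c.toNat, by omega⟩
  have hcn : 1 ≤ cn := by omega
  have hA := detectLoopA_eq t cn thr hcn f 0 0 none
  simp only [Nat.cast_zero, zero_add] at hA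
  have hC := altCross_eq t thr f 0
  simp only [Nat.cast_zero, zero_add] at hC
  have hrange : PySem.List.pyRange 0 ((f.length : Int) - (cn : Int) + 1) 1
      = List.map Nat.cast (List.range (f.length - (cn - 1))) := by
    rw [PySem.List.pyRange_one]
    have ht : (((f.length : Int) - (cn : Int) + 1) - 0).toNat = f.length - (cn - 1) := by omega
    rw [ht]
    apply List.map_congr_left
    intro a _
    simp
  rw [altFirstDay, hA, hrange, altWin_eq f t cn thr, goodW_zero_streak f cn thr hcn,
    find?_range_shift (cn - 1) (fun m => ((f.drop m).take cn).all (fun v => decide (thr ≤ v))), hC]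
  cases h : (List.range (f.length - (cn - 1))).find?
      (fun j => ((f.drop j).take cn).all (fun v => decide (thr ≤ v))) with
  | none => simp
  | some j =>
    simp only [Option.map_some]
    have hval : (((j + (cn - 1) : Nat) : Int)) - (cn : Int) + 1 = (j : Int) := by omega
    rw [hval]

-- ===== VERDICT (by name: the statement is the Claim_ definition above) =====
theorem detect_spoilage_spec : Claim_equal_detect_spoilage := by
  intro f t c _hdom hpre
  obtain ⟨hc, _hlen⟩ := hpre
  show detect_spoilage f t c = detect_spoilage_alt f t c
  simp only [detect_spoilage, detect_spoilage_alt, List.foldl_cons, List.foldl_nil]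
  rw [perThreshold f t c 220 hc, perThreshold f t c 250 hc]
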